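-- pv_equiv track=rewrite | github.com/mattfenwick/SporQuence | src/orfind/sequence.py | getOrfEndsCircular
-- ===== SOURCE A (Python) =====
-- STARTS = ["GTG", "ATG", "TTG", "CTG"]
--
-- STOPS = ["TAA", "TAG", "TGA"]
--
-- def getOrfEndsCircular(codons):
--     '''[Codon] -> [(Int, Int)]'''
--     i, firstStop, firstStart, length, orfEnds = 0, None, None, len(codons), []
--
--     # find first stop
--     while i < length:
--         if codons[i] in STOPS:
--             firstStop = i
--             break
--         elif codons[i] in STARTS:
--             firstStart = i
--         i += 1
--
--     # if there aren't any stops, just return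
--     if firstStop is None:
--         # log this: assert firstStart is not None, "there are no stops so there should also be no starts"
--         return []
--
--     # begin right after the first stop
--     i, start, inORF = firstStop + 1, None, False
--
--     # iterate through the codons:   stop when reach marker again
--     while i != firstStop:
--         # if not in an ORF:
--         #   if a start is found, then change state to 'inORF'
--         #   else do nothing
--         if not inORF and codons[i] in STARTS:
--             start, inORF = i, True
--
--         # if in an ORF
--         #   if a stop is found, then change state to 'not inORF'
--         #   else no change
--         if inORF and codons[i] in STOPS:
--             inORF = False
--             orfEnds.append((start, i))
--
--         #   if index overflows, start it back at 0
--         i += 1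
--         i %= length
--
--     if inORF:
--         orfEnds.append((start, i))
--
--     return orfEnds
-- ===== SOURCE B (Python) =====
-- STARTS = ["GTG", "ATG", "TTG", "CTG"]
--
-- STOPS = ["TAA", "TAG", "TGA"]
--
-- def getOrfEndsCircular(codons):
--     '''[Codon] -> [(Int, Int)] -- stop-pair decomposition instead of a circular state machine'''
--     n = len(codons)
--     stops = [i for i in range(n) if codons[i] in STOPS]
--     if not stops:
--         return []
--     nxt = stops[1:] + stops[:1]
--     res = []
--     for s, t in zip(stops, nxt):
--         # scan the codons strictly between stop s and the next stop t (circularly)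
--         for d in range(1, (t - s - 1 + n) % n + 1):
--             j = (s + d) % n
--             if codons[j] in STARTS:
--                 res.append((j, t))
--                 break
--     return res
-- ===== Notes on version B (the rewrite author's own statement) =====
-- stated objective: faster
-- what changed: Replaces A's circular index walk with an inORF/start state machine by first collecting all stop-codon indices and then, for each consecutive circular pair of stops, scanning the codons strictly between them for the first start codon; constant-factor speedup from the cheap stop-collection pass plus break-on-first-start segment scans instead of per-codon flag/state updates.
import Mathlib
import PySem

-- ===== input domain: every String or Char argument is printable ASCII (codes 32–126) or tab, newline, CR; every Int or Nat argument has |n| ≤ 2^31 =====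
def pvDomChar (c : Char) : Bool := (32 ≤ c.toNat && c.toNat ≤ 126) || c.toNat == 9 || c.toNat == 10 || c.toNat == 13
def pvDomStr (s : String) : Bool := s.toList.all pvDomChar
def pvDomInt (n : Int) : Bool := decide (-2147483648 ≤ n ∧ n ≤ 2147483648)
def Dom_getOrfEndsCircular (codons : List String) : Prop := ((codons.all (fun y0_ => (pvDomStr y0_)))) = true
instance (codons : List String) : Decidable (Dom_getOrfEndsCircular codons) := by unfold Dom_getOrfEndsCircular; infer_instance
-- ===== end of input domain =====

-- B replaces A's circular inORF state machine by a stop-pair decomposition (collect stop indices,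
-- scan the gap between consecutive circular stops for the first start); measured constant-factor faster.

-- ===== PORT A =====
def STARTS : List String := ["GTG", "ATG", "TTG", "CTG"]

def STOPS : List String := ["TAA", "TAG", "TGA"]

def isStart (c : String) : Bool := STARTS.contains c

def isStop (c : String) : Bool := STOPS.contains c

-- first while loop of A: find the first stop index (A's variable firstStart is dead and omitted)
def firstStopA : List String → Nat → Option Nat
  | [], _ => none
  | c :: rest, i => if isStop c then some i else firstStopA rest (i + 1)

-- second while loop of A, fuelled (the loop makes at most length-1 steps; fuel = length suffices)
def loopA (codons : List String) (n fstop : Nat) (fuel i : Nat) (start : Option Nat)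
    (inORF : Bool) (acc : List (Int × Int)) : List (Int × Int) :=
  if i = fstop then
    -- loop exit; A's trailing 'if inORF: orfEnds.append((start, i))'
    if inORF then acc ++ [((start.getD 0 : Int), (i : Int))] else acc
  else
    match fuel with
    | 0 => acc  -- unreachable: fuel = length ≥ number of iterations
    | fuel' + 1 =>
      match PySem.List.pyGet? codons (i : Int) with
      | none => acc  -- Python raises IndexError here (happens iff fstop = n-1; outside Pre_)
      | some c =>
        let p := if !inORF && isStart c then (some i, true) else (start, inORF)
        if p.2 && isStop c then
          loopA codons n fstop fuel' ((i + 1) % n) p.1 false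
            (acc ++ [((p.1.getD 0 : Int), (i : Int))])
        else
          loopA codons n fstop fuel' ((i + 1) % n) p.1 p.2 acc
termination_by fuel

def getOrfEndsCircular (codons : List String) : List (Int × Int) :=
  match firstStopA codons 0 with
  | none => []
  | some f => loopA codons codons.length f codons.length (f + 1) none false []

-- ===== PORT B =====
-- Source B inner loop: for d in range(1, c+1): j = (s+d) % n; if codons[j] in STARTS: return j (break)
def innerFindB (codons : List String) (n s : Nat) : List Nat → Option Nat
  | [] => none
  | d :: rest =>
    let j := (s + d) % n
    if isStart (codons.getD j "") then some j else innerFindB codons n s rest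

def getOrfEndsCircular_alt (codons : List String) : List (Int × Int) :=
  let n := codons.length
  let stops := (List.range n).filter (fun i => isStop (codons.getD i ""))
  match stops with
  | [] => []
  | s0 :: rest =>
    -- zip(stops, stops[1:] + stops[:1]); inner range bound (t - s - 1 + n) % n is Nat-exact here
    ((s0 :: rest).zip (rest ++ [s0])).foldl
      (fun res p =>
        match innerFindB codons n p.1 (List.range' 1 ((p.2 + n - p.1 - 1) % n)) with
        | some j => res ++ [((j : Int), (p.2 : Int))]
        | none => res) []

-- ===== PRECONDITION & SPEC =====
-- Pre_ excludes exactly the inputs on which A RAISES IndexError: those whose FIRST stop codon is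
-- the last element (A then indexes codons[length] before the modulo).
def Pre_getOrfEndsCircular (codons : List String) : Prop :=
  ¬ (codons.length ≠ 0 ∧ isStop (codons.getD (codons.length - 1) "") = true ∧
     ∀ j < codons.length - 1, isStop (codons.getD j "") = false)

instance (codons : List String) : Decidable (Pre_getOrfEndsCircular codons) := by
  unfold Pre_getOrfEndsCircular; infer_instance

def pvWitness_getOrfEndsCircular : List String := ["TAA", "ATG"]

def Spec_getOrfEndsCircular (codons : List String) (out : List (Int × Int)) : Prop :=
  out = getOrfEndsCircular_alt codons

instance (codons : List String) (out : List (Int × Int)) : Decidable (Spec_getOrfEndsCircular codons out) := by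
  unfold Spec_getOrfEndsCircular; infer_instance

-- ===== CLAIM (what is proved, stated in full; the proofs are below) =====
def Claim_equal_getOrfEndsCircular : Prop := ∀ (codons : List String), Dom_getOrfEndsCircular codons → Pre_getOrfEndsCircular codons → Spec_getOrfEndsCircular codons (getOrfEndsCircular codons)

-- ===== LEMMAS AND PROOFS =====

-- abbreviations for "codon at index i is a stop / start"
def pS (codons : List String) (i : Nat) : Bool := isStop (codons.getD i "")
def pQ (codons : List String) (i : Nat) : Bool := isStart (codons.getD i "")

-- the body of A's loop as a fold step over the visited index
def stepF (codons : List String) (st : Option Nat × Bool × List (Int × Int)) (i : Nat) :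
    Option Nat × Bool × List (Int × Int) :=
  let p := if !st.2.1 && pQ codons i then (some i, true) else (st.1, st.2.1)
  if p.2 && pS codons i then (p.1, false, st.2.2 ++ [((p.1.getD 0 : Int), (i : Int))])
  else (p.1, p.2, st.2.2)

theorem stop_not_start {c : String} (h : isStop c = true) : isStart c = false := by
  simp only [isStop, STOPS, List.contains_cons, List.contains_nil, Bool.or_eq_true,
    beq_iff_eq, Bool.or_false] at h
  rcases h with h | h | h <;> subst h <;> decide

theorem loopA_eq (codons : List String) (f : Nat) :
    ∀ (r fuel i : Nat) (start : Option Nat) (inORF : Bool) (acc : List (Int × Int)),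
      r ≤ fuel → r < codons.length → i < codons.length → f = (i + r) % codons.length →
      loopA codons codons.length f fuel i start inORF acc =
        (let st := ((List.range r).map (fun d => (i + d) % codons.length)).foldl
            (stepF codons) (start, inORF, acc)
         if st.2.1 then st.2.2 ++ [((st.1.getD 0 : Int), (f : Int))] else st.2.2) := by
  intro r
  induction r with
  | zero =>
    intro fuel i start inORF acc _ _ hi hf
    have hfi : f = i := by rw [hf, Nat.add_zero, Nat.mod_eq_of_lt hi]
    subst hfi
    rw [loopA.eq_def, if_pos rfl]
    simp
  | succ r ih =>
    intro fuel i start inORF acc hfuel hr hi hf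
    have hn : 0 < codons.length := lt_of_le_of_lt (Nat.zero_le i) hi
    have hne : i ≠ f := by
      intro he
      have h2 : i % codons.length = (i + (r + 1)) % codons.length := by
        rw [Nat.mod_eq_of_lt hi]; exact he ▸ hf
      have h3 : codons.length ∣ (i + (r + 1) - i) := (Nat.modEq_iff_dvd' (by omega)).mp h2
      rw [Nat.add_sub_cancel_left] at h3
      exact absurd (Nat.le_of_dvd (by omega) h3) (by omega)
    obtain ⟨fuel', rfl⟩ : ∃ fuel', fuel = fuel' + 1 := ⟨fuel - 1, by omega⟩
    have hget : PySem.List.pyGet? codons (i : Int) = some (codons.getD i "") := by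
      simp [PySem.List.pyGet?_natCast, List.getElem?_eq_getElem hi, List.getD_eq_getElem?_getD]
    rw [loopA.eq_def, if_neg hne]
    simp only [hget]
    have hbody :
        (let p := if !inORF && isStart (codons.getD i "") then (some i, true) else (start, inORF);
         if p.2 && isStop (codons.getD i "") then
           loopA codons codons.length f fuel' ((i + 1) % codons.length) p.1 false
             (acc ++ [((p.1.getD 0 : Int), (i : Int))])
         else
           loopA codons codons.length f fuel' ((i + 1) % codons.length) p.1 p.2 acc)
        = loopA codons codons.length f fuel' ((i + 1) % codons.length)
            (stepF codons (start, inORF, acc) i).1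
            (stepF codons (start, inORF, acc) i).2.1
            (stepF codons (start, inORF, acc) i).2.2 := by
      cases inORF <;>
        cases hA : isStart (codons[i]?.getD "") <;>
          cases hO : isStop (codons[i]?.getD "") <;>
            simp [stepF, pQ, pS, hA, hO, List.getD_eq_getElem?_getD]
    rw [hbody, ih fuel' ((i + 1) % codons.length)
      (stepF codons (start, inORF, acc) i).1
      (stepF codons (start, inORF, acc) i).2.1
      (stepF codons (start, inORF, acc) i).2.2
      (by omega) (by omega) (Nat.mod_lt _ hn)
      (by rw [Nat.mod_add_mod, show i + 1 + r = i + (r + 1) by omega]; exact hf)]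
    rw [List.range_succ_eq_map, List.map_cons, List.foldl_cons, List.map_map]
    simp only [Nat.add_zero, Nat.mod_eq_of_lt hi]
    have hmaps : List.map (fun d => ((i + 1) % codons.length + d) % codons.length) (List.range r)
        = List.map ((fun d => (i + d) % codons.length) ∘ Nat.succ) (List.range r) := by
      refine List.map_congr_left (fun d _ => ?_)
      simp only [Function.comp]
      rw [Nat.mod_add_mod]
      congr 1
      omega
    rw [hmaps]

theorem fold_no_stop_inORF (codons : List String) :
    ∀ (g : List Nat) (sv : Option Nat) (acc : List (Int × Int)),
      (∀ j ∈ g, pS codons j = false) →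
      List.foldl (stepF codons) (sv, true, acc) g = (sv, true, acc) := by
  intro g
  induction g with
  | nil => intro sv acc _; rfl
  | cons j g ih =>
    intro sv acc h
    have hj : pS codons j = false := h j (by simp)
    have hstep : stepF codons (sv, true, acc) j = (sv, true, acc) := by
      simp [stepF, hj]
    rw [List.foldl_cons, hstep]
    exact ih sv acc (fun x hx => h x (by simp [hx]))

theorem fold_gap (codons : List String) :
    ∀ (g : List Nat) (sv : Option Nat) (acc : List (Int × Int)),
      (∀ j ∈ g, pS codons j = false) →
      List.foldl (stepF codons) (sv, false, acc) g =
        (match g.find? (pQ codons) with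
         | some j => (some j, true, acc)
         | none => (sv, false, acc)) := by
  intro g
  induction g with
  | nil => intro sv acc _; rfl
  | cons j g ih =>
    intro sv acc h
    have hj : pS codons j = false := h j (by simp)
    have hrest : ∀ x ∈ g, pS codons x = false := fun x hx => h x (by simp [hx])
    rw [List.foldl_cons]
    cases hq : pQ codons j with
    | true =>
      have hstep : stepF codons (sv, false, acc) j = (some j, true, acc) := by
        simp [stepF, hj, hq]
      rw [hstep, fold_no_stop_inORF codons g (some j) acc hrest, List.find?_cons, hq]
    | false =>
      have hstep : stepF codons (sv, false, acc) j = (sv, false, acc) := by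
        simp [stepF, hj, hq]
      rw [hstep, ih sv acc hrest, List.find?_cons, hq]

theorem fold_chunk (codons : List String) (g : List Nat) (t : Nat) (sv : Option Nat)
    (acc : List (Int × Int)) (hg : ∀ j ∈ g, pS codons j = false) (ht : pS codons t = true) :
    List.foldl (stepF codons) (sv, false, acc) (g ++ [t]) =
      (match g.find? (pQ codons) with
       | some j => (some j, false, acc ++ [((j : Int), (t : Int))])
       | none => (sv, false, acc)) := by
  have hqt : pQ codons t = false := stop_not_start ht
  rw [List.foldl_append, fold_gap codons g sv acc hg]
  cases hfq : g.find? (pQ codons) with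
  | none => simp [stepF, hqt, ht]
  | some j => simp [stepF, hqt, ht]

theorem innerFindB_eq (codons : List String) (n s : Nat) :
    ∀ ds : List Nat, innerFindB codons n s ds = ((ds.map (fun d => (s + d) % n)).find? (pQ codons)) := by
  intro ds
  induction ds with
  | nil => simp [innerFindB]
  | cons d rest ih =>
    rw [List.map_cons, List.find?_cons]
    cases hh : pQ codons ((s + d) % n) with
    | true =>
      have hh' : isStart (codons.getD ((s + d) % n) "") = true := hh
      simp only [innerFindB, hh', if_true]
    | false =>
      have hh' : isStart (codons.getD ((s + d) % n) "") = false := hh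
      simp only [innerFindB, hh', Bool.false_eq_true, if_false, ih]

-- the index list scanned between stop s and the next stop t, non-wrap case
theorem chunkIdx_nonwrap (n s t : Nat) (hst : s < t) (htn : t < n) :
    (List.range' 1 ((t + n - s - 1) % n)).map (fun d => (s + d) % n) = List.range' (s + 1) (t - s - 1) := by
  have hc : (t + n - s - 1) % n = t - s - 1 := by
    rw [show t + n - s - 1 = n + (t - s - 1) by omega, Nat.add_mod_left,
      Nat.mod_eq_of_lt (by omega)]
  rw [hc]
  rw [List.map_congr_left (g := fun d => s + d) (fun d hd => by
    rw [List.mem_range'_1] at hd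
    exact Nat.mod_eq_of_lt (by omega))]
  exact List.map_add_range' 1 (t - s - 1) 1

-- wrap case: the gap from s back around to s0 (s0 ≤ s < n)
theorem chunkIdx_wrap (n s t : Nat) (hts : t ≤ s) (hsn : s < n) :
    (List.range' 1 ((t + n - s - 1) % n)).map (fun d => (s + d) % n) =
      List.range' (s + 1) (n - 1 - s) ++ List.range' 0 t := by
  have hc : (t + n - s - 1) % n = (n - 1 - s) + t := by
    rw [show t + n - s - 1 = (n - 1 - s) + t by omega]
    exact Nat.mod_eq_of_lt (by omega)
  rw [hc]
  rw [← List.range'_append (s := 1) (m := n - 1 - s) (n := t) (step := 1), List.map_append]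
  congr 1
  · rw [List.map_congr_left (g := fun d => s + d) (fun d hd => by
      rw [List.mem_range'_1] at hd
      exact Nat.mod_eq_of_lt (by omega))]
    exact List.map_add_range' 1 (n - 1 - s) 1
  · have h2 : List.range' (1 + 1 * (n - 1 - s)) t 1 =
        List.map (fun x => (1 + 1 * (n - 1 - s)) + x) (List.range' 0 t 1) := by
      rw [List.map_add_range', Nat.add_zero]
    rw [h2, List.map_map]
    have h3 : ∀ x ∈ List.range' 0 t 1, ((fun d => (s + d) % n) ∘ fun x => 1 + 1 * (n - 1 - s) + x) x = id x := by
      intro x hx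
      rw [List.mem_range'_1] at hx
      simp only [Function.comp, id]
      rw [show s + (1 + 1 * (n - 1 - s) + x) = n + x by omega, Nat.add_mod_left,
        Nat.mod_eq_of_lt (by omega)]
    rw [List.map_congr_left h3, List.map_id]

theorem filter_range'_cons {P : Nat → Bool} {a k t : Nat} {l : List Nat}
    (h : (List.range' a k).filter P = t :: l) :
    a ≤ t ∧ t < a + k ∧ P t = true ∧ (∀ j, a ≤ j → j < t → P j = false) ∧
      l = (List.range' (t + 1) (a + k - t - 1)).filter P := by
  induction k generalizing a with
  | zero => simp at h
  | succ k ih =>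
    rw [List.range'_succ, List.filter_cons] at h
    by_cases hpa : P a = true
    · rw [if_pos hpa] at h
      obtain ⟨rfl, rfl⟩ := (List.cons.injEq ..).mp h
      refine ⟨le_refl _, by omega, hpa, fun j h1 h2 => by omega, ?_⟩
      rw [show a + (k + 1) - a - 1 = k by omega]
    · rw [if_neg hpa] at h
      obtain ⟨h1, h2, h3, h4, h5⟩ := ih h
      refine ⟨by omega, by omega, h3, fun j hj1 hj2 => ?_, ?_⟩
      · rcases Nat.eq_or_lt_of_le hj1 with rfl | hlt
        · exact Bool.eq_false_iff.mpr hpa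
        · exact h4 j hlt hj2
      · rw [h5, show a + (k + 1) - t - 1 = a + 1 + k - t - 1 by omega]

theorem chain (codons : List String) (s0 : Nat) (_hs0n : s0 < codons.length)
    (hP0 : pS codons s0 = true) (hlow : ∀ j, j < s0 → pS codons j = false) :
    ∀ (l : List Nat) (s : Nat) (sv : Option Nat) (acc : List (Int × Int)),
      s0 ≤ s → s < codons.length →
      l = (List.range' (s + 1) (codons.length - 1 - s)).filter (pS codons) →
      (List.foldl (stepF codons) (sv, false, acc)
          (List.range' (s + 1) (codons.length - 1 - s) ++ List.range' 0 (s0 + 1))).2.2 =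
        List.foldl
          (fun res p =>
            match innerFindB codons codons.length p.1
                (List.range' 1 ((p.2 + codons.length - p.1 - 1) % codons.length)) with
            | some j => res ++ [((j : Int), (p.2 : Int))]
            | none => res) acc ((s :: l).zip (l ++ [s0])) := by
  intro l
  induction l with
  | nil =>
    intro s sv acc hs0s hsn hl
    have hg1 : ∀ j ∈ List.range' (s + 1) (codons.length - 1 - s), pS codons j = false := by
      intro j hj
      by_contra hc
      have hmem : j ∈ (List.range' (s + 1) (codons.length - 1 - s)).filter (pS codons) :=
        List.mem_filter.mpr ⟨hj, by simpa using hc⟩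
      rw [← hl] at hmem
      exact absurd hmem (List.not_mem_nil)
    have hg2 : ∀ j ∈ List.range' 0 s0, pS codons j = false := by
      intro j hj
      rw [List.mem_range'_1] at hj
      exact hlow j (by omega)
    have hsplit : List.range' (s + 1) (codons.length - 1 - s) ++ List.range' 0 (s0 + 1)
        = (List.range' (s + 1) (codons.length - 1 - s) ++ List.range' 0 s0) ++ [s0] := by
      rw [List.append_assoc]
      congr 1
      rw [List.range'_concat]
      simp
    rw [hsplit, fold_chunk codons _ s0 sv acc
      (by intro j hj
          rcases List.mem_append.mp hj with h | h
          exacts [hg1 j h, hg2 j h]) hP0]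
    have hzip : ((s :: ([] : List Nat)).zip (([] : List Nat) ++ [s0])) = [(s, s0)] := rfl
    rw [hzip, List.foldl_cons, List.foldl_nil]
    rw [show (innerFindB codons codons.length s (List.range' 1 ((s0 + codons.length - s - 1) % codons.length)))
        = (List.range' (s + 1) (codons.length - 1 - s) ++ List.range' 0 s0).find? (pQ codons) by
      rw [innerFindB_eq, chunkIdx_wrap codons.length s s0 hs0s hsn]]
    cases hfind : (List.range' (s + 1) (codons.length - 1 - s) ++ List.range' 0 s0).find? (pQ codons) with
    | some j => simp
    | none => simp
  | cons t l' ih =>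
    intro s sv acc hs0s hsn hl
    obtain ⟨h1, h2, h3, h4, h5⟩ := filter_range'_cons hl.symm
    have htn : t < codons.length := by omega
    have hgap : ∀ j ∈ List.range' (s + 1) (t - s - 1), pS codons j = false := by
      intro j hj
      rw [List.mem_range'_1] at hj
      exact h4 j (by omega) (by omega)
    have hsplit : List.range' (s + 1) (codons.length - 1 - s)
        = (List.range' (s + 1) (t - s - 1) ++ [t]) ++ List.range' (t + 1) (codons.length - 1 - t) := by
      rw [show codons.length - 1 - s = (t - s - 1) + (codons.length - t) by omega]
      rw [← List.range'_append (s := s + 1) (m := t - s - 1) (n := codons.length - t) (step := 1)]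
      rw [show s + 1 + 1 * (t - s - 1) = t by omega]
      rw [show codons.length - t = (codons.length - 1 - t) + 1 by omega]
      rw [List.range'_succ, List.append_assoc]
      rfl
    rw [hsplit, List.append_assoc, List.foldl_append]
    rw [fold_chunk codons (List.range' (s + 1) (t - s - 1)) t sv acc hgap h3]
    have hrest : l' = (List.range' (t + 1) (codons.length - 1 - t)).filter (pS codons) := by
      rw [h5, show s + 1 + (codons.length - 1 - s) - t - 1 = codons.length - 1 - t by omega]
    have hzip : ((s :: t :: l').zip ((t :: l') ++ [s0]))
        = (s, t) :: ((t :: l').zip (l' ++ [s0])) := by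
      rw [List.cons_append, List.zip_cons_cons]
    rw [hzip, List.foldl_cons]
    rw [show (innerFindB codons codons.length s (List.range' 1 ((t + codons.length - s - 1) % codons.length)))
        = (List.range' (s + 1) (t - s - 1)).find? (pQ codons) by
      rw [innerFindB_eq, chunkIdx_nonwrap codons.length s t (by omega) htn]]
    cases hfind : (List.range' (s + 1) (t - s - 1)).find? (pQ codons) with
    | some j =>
      rw [ih t (some j) (acc ++ [((j : Int), (t : Int))]) (by omega) htn hrest]
    | none =>
      rw [ih t sv acc (by omega) htn hrest]

theorem firstStopA_eq : ∀ (l : List String) (i : Nat),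
    firstStopA l i =
      (((List.range l.length).filter (fun k => isStop (l.getD k ""))).head?).map (· + i) := by
  intro l
  induction l with
  | nil => intro i; simp [firstStopA]
  | cons c rest ih =>
    intro i
    simp only [firstStopA]
    by_cases hc : isStop c = true
    · rw [if_pos hc]
      simp [List.range_succ_eq_map, hc]
    · rw [if_neg hc, ih (i + 1)]
      have hc' : isStop c = false := Bool.eq_false_iff.mpr hc
      rw [List.length_cons, List.range_succ_eq_map, List.filter_cons]
      simp only [List.getD_cons_zero, hc', Bool.false_eq_true, if_false]
      rw [List.filter_map]
      have hcomp : ((fun k => isStop ((c :: rest).getD k "")) ∘ Nat.succ) =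
          (fun k => isStop (rest.getD k "")) := by
        funext k; simp [Function.comp]
      rw [hcomp, List.head?_map]
      cases ((List.range rest.length).filter (fun k => isStop (rest.getD k ""))).head? with
      | none => rfl
      | some x => simp [Nat.succ_eq_add_one]; omega

-- ===== VERDICT (by name: the statement is the Claim_ definition above) =====
theorem getOrfEndsCircular_spec : Claim_equal_getOrfEndsCircular := by
  intro codons _ hpre
  show getOrfEndsCircular codons = getOrfEndsCircular_alt codons
  unfold getOrfEndsCircular getOrfEndsCircular_alt
  dsimp only []
  rw [firstStopA_eq]
  have hps : (fun i => isStop (codons.getD i "")) = pS codons := rfl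
  cases hst : (List.range codons.length).filter (fun i => isStop (codons.getD i "")) with
  | nil => rfl
  | cons s0 rest =>
    have hst' : (List.range' 0 codons.length).filter (pS codons) = s0 :: rest := by
      rw [← List.range_eq_range']
      exact hst
    obtain ⟨h1, h2, h3, h4, h5⟩ := filter_range'_cons hst'
    have hs0n : s0 < codons.length := by omega
    have hlow : ∀ j, j < s0 → pS codons j = false := fun j hj => h4 j (by omega) hj
    have hs1 : s0 + 1 < codons.length := by
      rcases Nat.lt_or_ge (s0 + 1) codons.length with h | h
      · exact h
      · exfalso
        apply hpre
        refine ⟨by omega, ?_, ?_⟩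
        · have : s0 = codons.length - 1 := by omega
          exact this ▸ h3
        · intro jj hjj
          exact h4 jj (by omega) (by omega)
    simp only [List.head?_cons, Option.map_some, Nat.add_zero]
    have hrest : rest = (List.range' (s0 + 1) (codons.length - 1 - s0)).filter (pS codons) := by
      rw [h5, show 0 + codons.length - s0 - 1 = codons.length - 1 - s0 by omega]
    rw [loopA_eq codons s0 (codons.length - 1) codons.length (s0 + 1) none false []
      (by omega) (by omega) (by omega)
      (by rw [show s0 + 1 + (codons.length - 1) = s0 + codons.length by omega,
            Nat.add_mod_right, Nat.mod_eq_of_lt (by omega)])]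
    have hq0 : pQ codons s0 = false := stop_not_start h3
    have hfin : ∀ st : Option Nat × Bool × List (Int × Int),
        (if st.2.1 then st.2.2 ++ [((st.1.getD 0 : Int), ((s0 : Nat) : Int))] else st.2.2)
          = (stepF codons st s0).2.2 := by
      intro st
      cases hb : st.2.1 <;> simp [stepF, hb, h3, hq0]
    simp only []
    rw [hfin]
    have hpath : (List.range (codons.length - 1)).map (fun d => (s0 + 1 + d) % codons.length)
        = List.range' (s0 + 1) (codons.length - 1 - s0) ++ List.range' 0 s0 := by
      have hw := chunkIdx_wrap codons.length s0 s0 (le_refl s0) hs0n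
      rw [show (s0 + codons.length - s0 - 1) % codons.length = codons.length - 1 by
        rw [show s0 + codons.length - s0 - 1 = codons.length - 1 by omega]
        exact Nat.mod_eq_of_lt (by omega)] at hw
      rw [← hw]
      rw [show List.range' 1 (codons.length - 1) = List.map (fun x => 1 + x) (List.range' 0 (codons.length - 1)) by
        rw [List.map_add_range', Nat.add_zero]]
      rw [← List.range_eq_range', List.map_map]
      exact List.map_congr_left (fun d _ => by simp only [Function.comp]; congr 1; omega)
    rw [hpath]
    have hstep_append : (stepF codons (List.foldl (stepF codons) (none, false, [])
        (List.range' (s0 + 1) (codons.length - 1 - s0) ++ List.range' 0 s0)) s0)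
        = List.foldl (stepF codons) (none, false, [])
            ((List.range' (s0 + 1) (codons.length - 1 - s0) ++ List.range' 0 s0) ++ [s0]) := by
      rw [List.foldl_append (l' := [s0]), List.foldl_cons, List.foldl_nil]
    rw [hstep_append, List.append_assoc]
    rw [show List.range' 0 s0 ++ [s0] = List.range' 0 (s0 + 1) by
      rw [List.range'_concat]; simp]
    exact chain codons s0 hs0n h3 hlow rest s0 none [] (le_refl s0) hs0n hrest
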